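-- pv_equiv track=rewrite | github.com/gmltmd23/Algorithm-Study | 2021 Study/BAEKJOON/그리디/그리디_컵홀더.py | solution
-- ===== SOURCE A (Python) =====
-- def solution(n, seats):
--     if seats[0] == 'S':
--         cups = 2
--         couple = False
--     else:
--         cups = 1
--         couple = True
--
--     for i in range(1, n):
--         if seats[i] == 'S':
--             cups += 1
--         else:
--             if couple:
--                 cups += 1
--                 couple = False
--             else:
--                 couple = True
--
--     return cups if cups < n else n
-- ===== SOURCE B (Python) =====
-- def solution(n, seats):
--     s = seats[:n].count('S')
--     cups = s + 1 + (n - s) // 2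
--     return min(cups, n)
-- ===== Notes on version B (the rewrite author's own statement) =====
-- stated objective: simpler
-- what changed: Replaces the flag-toggling scan over seats with counting 'S' in the first n seats once and a closed arithmetic formula s + 1 + (n-s)//2 capped at n.
import Mathlib
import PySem

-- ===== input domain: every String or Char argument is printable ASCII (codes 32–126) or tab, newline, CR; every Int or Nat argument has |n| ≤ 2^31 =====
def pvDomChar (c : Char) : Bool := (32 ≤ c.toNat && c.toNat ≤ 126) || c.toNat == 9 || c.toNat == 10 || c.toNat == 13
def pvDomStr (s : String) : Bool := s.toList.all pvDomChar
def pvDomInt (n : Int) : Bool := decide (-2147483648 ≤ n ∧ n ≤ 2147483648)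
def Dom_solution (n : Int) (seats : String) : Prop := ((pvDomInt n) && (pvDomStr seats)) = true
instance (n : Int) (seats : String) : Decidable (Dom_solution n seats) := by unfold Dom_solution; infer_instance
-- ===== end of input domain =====

-- B replaces A's flag-toggling scan with a count of 'S' in the first n seats plus a closed formula, capped at n (objective: simpler).


-- ===== PORT A =====
-- the loop body of A's for-loop; state = (cups, couple)
def solutionStep (seats : String) (st : Int × Bool) (i : Int) : Int × Bool :=
  if (PySem.Str.pyGet? seats i).getD ' ' = 'S' then (st.1 + 1, st.2)
  else if st.2 then (st.1 + 1, false) else (st.1, true)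

def solution (n : Int) (seats : String) : Int :=
  -- seats[0]: inside Pre_ the index is in range; .getD supplies an (unused) default outside it
  let init : Int × Bool :=
    if (PySem.Str.pyGet? seats 0).getD ' ' = 'S' then (2, false) else (1, true)
  let r := (PySem.List.pyRange 1 n 1).foldl (solutionStep seats) init
  if r.1 < n then r.1 else n

-- ===== PORT B =====
def solution_alt (n : Int) (seats : String) : Int :=
  let s : Int := (PySem.Str.count (PySem.Str.slice seats none (some n)) "S" : Nat)
  let cups : Int := s + 1 + PySem.Int.floordiv (n - s) 2
  min cups n

-- ===== PRECONDITION & SPEC =====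
-- Pre_ excludes exactly the inputs where A raises IndexError: empty seats (seats[0]) or n > len(seats) (seats[i] in the loop).
def Pre_solution (n : Int) (seats : String) : Prop :=
  seats.toList ≠ [] ∧ n ≤ (seats.toList.length : Int)
instance (n : Int) (seats : String) : Decidable (Pre_solution n seats) := by unfold Pre_solution; infer_instance
def pvWitness_solution : Int × String := (3, "SLL")

def Spec_solution (n : Int) (seats : String) (out : Int) : Prop := out = solution_alt n seats
instance (n : Int) (seats : String) (out : Int) : Decidable (Spec_solution n seats out) := by unfold Spec_solution; infer_instance

-- ===== CLAIM (what is proved, stated in full; the proofs are below) =====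
def Claim_equal_solution : Prop := ∀ (n : Int) (seats : String), Dom_solution n seats → Pre_solution n seats → Spec_solution n seats (solution n seats)

-- ===== LEMMAS AND PROOFS =====

-- single-character substring count is List.count
lemma count_go_singleton (c : Char) :
    ∀ (s : List Char) (fuel acc : Nat), s.length ≤ fuel →
      PySem.Chars.count.go [c] fuel s acc = acc + s.count c := by
  intro s
  induction s with
  | nil => intro fuel acc _; cases fuel <;> simp [PySem.Chars.count.go]
  | cons h t ih =>
    intro fuel acc hf
    cases fuel with
    | zero => simp at hf
    | succ f =>
      simp only [List.length_cons] at hf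
      rw [PySem.Chars.count.go]
      by_cases hc : h = c
      · subst hc
        simp only [List.isPrefixOf, beq_self_eq_true, Bool.and_eq_true, and_true, if_true, List.length_cons, List.length_nil, List.drop_succ_cons, List.drop_zero]
        rw [ih f (acc+1) (by omega)]
        simp
        omega
      · simp only [List.isPrefixOf, Bool.and_true]
        rw [if_neg (by simp only [beq_iff_eq]; exact fun e => hc e.symm)]
        rw [ih f acc (by omega)]
        rw [List.count_cons]
        simp only [beq_iff_eq]
        rw [if_neg hc]
        omega

lemma count_singleton (s : List Char) (c : Char) :
    PySem.Chars.count s [c] = s.count c := by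
  simpa using count_go_singleton c s s.length 0 le_rfl

-- loop invariant of A: after the first k seats, cups = S-count + 1 + L/2 and couple ↔ L odd
lemma loop_inv (seats : String) (k : Nat) (h1 : 1 ≤ k) (hk : k ≤ seats.toList.length) :
    (PySem.List.pyRange 1 (k : Int) 1).foldl (solutionStep seats)
      (if (PySem.Str.pyGet? seats 0).getD ' ' = 'S' then (2, false) else (1, true))
    = ((((seats.toList.take k).count 'S' : Int) + 1
          + ((k - (seats.toList.take k).count 'S') / 2 : Nat)),
       decide ((k - (seats.toList.take k).count 'S') % 2 = 1)) := by
  induction k with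
  | zero => omega
  | succ m ih =>
    rcases Nat.eq_or_lt_of_le h1 with hb | hstep
    · -- base: m + 1 = 1
      have hm : m = 0 := by omega
      subst hm
      have h0 : seats.toList ≠ [] := by
        intro h; rw [h] at hk; simp at hk
      obtain ⟨c, t, hct⟩ := List.exists_cons_of_ne_nil h0
      have hr : PySem.List.pyRange 1 ((0 + 1 : Nat) : Int) 1 = [] := by decide
      rw [hr]
      simp only [List.foldl_nil]
      have hg : (PySem.Str.pyGet? seats 0).getD ' ' = c := by
        rw [show (0:Int) = ((0:Nat):Int) from rfl, PySem.Str.pyGet?_natCast, hct]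
        rfl
      rw [hg, hct]
      by_cases hc : c = 'S'
      · simp [hc]
      · simp [hc]
    · have hm1 : 1 ≤ m := by omega
      have hkm : m ≤ seats.toList.length := by omega
      have hmlt : m < seats.toList.length := by omega
      have hcast : ((m + 1 : Nat) : Int) = (m : Int) + 1 := by push_cast; ring
      rw [hcast, PySem.List.pyRange_one_succ_right (by exact_mod_cast hm1), List.foldl_append,
          ih hm1 hkm]
      simp only [List.foldl_cons, List.foldl_nil]
      have hg : (PySem.Str.pyGet? seats (m : Int)).getD ' ' = seats.toList[m] := by
        rw [PySem.Str.pyGet?_natCast]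
        simp [List.getElem?_eq_getElem hmlt]
      have htake : seats.toList.take (m + 1) = seats.toList.take m ++ [seats.toList[m]] := by
        rw [List.take_add_one, List.getElem?_eq_getElem hmlt]
        rfl
      have hsm : (seats.toList.take m).count 'S' ≤ m := by
        calc (seats.toList.take m).count 'S' ≤ (seats.toList.take m).length := List.count_le_length
        _ ≤ m := by simp
      rw [htake, List.count_append]
      unfold solutionStep
      rw [hg]
      by_cases hS : seats.toList[m] = 'S'
      · rw [if_pos hS]
        simp only [hS, List.count_singleton, beq_self_eq_true, if_true]
        simp only [Prod.mk.injEq]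
        refine ⟨?_, ?_⟩
        · push_cast
          omega
        · simp only [decide_eq_decide]
          omega
      · rw [if_neg hS]
        have hc0 : List.count 'S' [seats.toList[m]] = 0 := by
          simp only [List.count_singleton, beq_iff_eq]
          rw [if_neg (fun e => hS e)]
        rw [hc0]
        by_cases hpar : (m - (seats.toList.take m).count 'S') % 2 = 1
        · simp only [hpar, decide_true, if_true]
          simp only [Prod.mk.injEq]
          refine ⟨?_, ?_⟩
          · push_cast
            omega
          · symm
            simp only [decide_eq_false_iff_not]
            omega
        · simp only [hpar, decide_false, Bool.false_eq_true, if_false]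
          simp only [Prod.mk.injEq]
          refine ⟨?_, ?_⟩
          · push_cast
            omega
          · symm
            simp only [decide_eq_true_eq]
            omega

lemma pyRange_one_nil (n : Int) (h : n ≤ 0) : PySem.List.pyRange 1 n 1 = [] := by
  simp [PySem.List.pyRange]; omega

-- ===== VERDICT (by name: the statement is the Claim_ definition above) =====
theorem solution_spec : Claim_equal_solution := by
  intro n seats _ hpre
  obtain ⟨hne, hlen⟩ := hpre
  unfold Spec_solution solution solution_alt
  dsimp only
  by_cases hn : n ≤ 0
  · -- n ≤ 0: A's loop is empty and both sides return n
    rw [pyRange_one_nil n hn]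
    simp only [List.foldl_nil]
    rw [PySem.Int.floordiv_eq_ediv_of_pos (by norm_num)]
    have hc0 : (0 : Int) ≤ (PySem.Str.count (PySem.Str.slice seats none (some n)) "S" : Nat) :=
      Int.natCast_nonneg _
    split_ifs <;> omega
  · -- n ≥ 1
    have hk1 : 1 ≤ n.toNat := by omega
    have hkn : (n.toNat : Int) = n := by omega
    have hkl : n.toNat ≤ seats.toList.length := by omega
    rw [← hkn, loop_inv seats n.toNat hk1 hkl]
    have hs : (PySem.Str.count (PySem.Str.slice seats none (some ((n.toNat : Nat) : Int))) "S" : Nat)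
        = (seats.toList.take n.toNat).count 'S' := by
      rw [PySem.Str.count_eq, PySem.Str.toList_slice, PySem.Chars.slice_eq_listSlice,
          PySem.List.slice_to_natCast]
      exact count_singleton _ _
    rw [hs]
    rw [PySem.Int.floordiv_eq_ediv_of_pos (by norm_num)]
    have hcle : (seats.toList.take n.toNat).count 'S' ≤ n.toNat := by
      calc (seats.toList.take n.toNat).count 'S' ≤ (seats.toList.take n.toNat).length :=
            List.count_le_length
        _ ≤ n.toNat := by simp
    split_ifs <;> omega
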